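-- pv_equiv track=rewrite | github.com/emanuelen5/aoc2021 | days/17/solution.py | brute_force_landing_position
-- ===== SOURCE A (Python) =====
-- def brute_force_landing_position(vx0, vy0):
--     t = vy0 * 2 + 2
--     vx = vx0
--     vy = vy0
--     x = 0
--     y = 0
--     for _ in range(t):
--         x += vx
--         y += vy
--         if vx > 0:
--             vx -= 1
--         vy -= 1
--     return x, y
-- ===== SOURCE B (Python) =====
-- def brute_force_landing_position(vx0, vy0):
--     t = 2 * vy0 + 2
--     if t <= 0:
--         return 0, 0
--     if vx0 <= 0:
--         x = t * vx0
--     elif t <= vx0: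
--         x = t * vx0 - t * (t - 1) // 2
--     else:
--         x = vx0 * (vx0 + 1) // 2
--     return x, -(vy0 + 1)
-- ===== Notes on version B (the rewrite author's own statement) =====
-- stated objective: faster
-- what changed: Replaces the step-by-step simulation over range(2*vy0+2) with closed-form triangular-number formulas for x (clamped by drag) and y, guarded by t<=0.
import Mathlib
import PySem

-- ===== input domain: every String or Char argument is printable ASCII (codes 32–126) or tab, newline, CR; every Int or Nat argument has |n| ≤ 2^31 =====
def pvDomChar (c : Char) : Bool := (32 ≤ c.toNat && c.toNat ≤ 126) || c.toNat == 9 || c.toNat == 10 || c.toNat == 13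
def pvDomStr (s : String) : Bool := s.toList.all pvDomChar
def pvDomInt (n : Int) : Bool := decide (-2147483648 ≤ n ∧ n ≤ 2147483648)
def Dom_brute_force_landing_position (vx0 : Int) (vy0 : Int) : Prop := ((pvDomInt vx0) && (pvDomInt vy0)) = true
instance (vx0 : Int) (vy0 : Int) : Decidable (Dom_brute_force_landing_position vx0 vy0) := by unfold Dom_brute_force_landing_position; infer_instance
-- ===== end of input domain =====

-- B replaces A's step-by-step simulation loop with closed-form triangular-number formulas (objective: faster).

-- ===== PORT A =====
-- the body of A's `for _ in range(t)` loop, run n times on state (x, y, vx, vy)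
def pvLoopA : Nat → (Int × Int × Int × Int) → Int × Int × Int × Int
  | 0, s => s
  | n + 1, (x, y, vx, vy) =>
      pvLoopA n (x + vx, y + vy, if vx > 0 then vx - 1 else vx, vy - 1)

def brute_force_landing_position (vx0 : Int) (vy0 : Int) : Int × Int :=
  let t := vy0 * 2 + 2
  let s := pvLoopA t.toNat (0, 0, vx0, vy0)   -- range(t) is empty for t ≤ 0
  (s.1, s.2.1)

-- ===== PORT B =====
def brute_force_landing_position_alt (vx0 : Int) (vy0 : Int) : Int × Int :=
  let t := 2 * vy0 + 2
  if t ≤ 0 then (0, 0)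
  else
    let x :=
      if vx0 ≤ 0 then t * vx0
      else if t ≤ vx0 then t * vx0 - PySem.Int.floordiv (t * (t - 1)) 2
      else PySem.Int.floordiv (vx0 * (vx0 + 1)) 2
    (x, -(vy0 + 1))

-- ===== PRECONDITION & SPEC =====
def Spec_brute_force_landing_position (vx0 : Int) (vy0 : Int) (out : Int × Int) : Prop := out = brute_force_landing_position_alt vx0 vy0
instance (vx0 : Int) (vy0 : Int) (out : Int × Int) : Decidable (Spec_brute_force_landing_position vx0 vy0 out) := by unfold Spec_brute_force_landing_position; infer_instance

-- ===== CLAIM (what is proved, stated in full; the proofs are below) =====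
def Claim_equal_brute_force_landing_position : Prop := ∀ (vx0 : Int) (vy0 : Int), Dom_brute_force_landing_position vx0 vy0 → Spec_brute_force_landing_position vx0 vy0 (brute_force_landing_position vx0 vy0)

-- ===== LEMMAS AND PROOFS =====

-- triangular number 0 + 1 + … + (n-1), as an integer
def pvTri (n : Nat) : Int := (n : Int) * ((n : Int) - 1) / 2

lemma pvTwoMul_ediv (k : Int) : 2 * k / 2 = k := Int.mul_ediv_cancel_left k (by norm_num)

lemma pvTri_succ (n : Nat) : pvTri (n + 1) = pvTri n + n := by
  unfold pvTri
  push_cast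
  have h : ((n : Int) + 1) * ((n : Int) + 1 - 1) = (n : Int) * ((n : Int) - 1) + (n : Int) * 2 := by
    ring
  rw [h, Int.add_mul_ediv_right _ _ (by norm_num : (2 : Int) ≠ 0)]

-- closed form for the whole loop state after n iterations
lemma pvLoopA_char (n : Nat) (x y vx vy : Int) :
    pvLoopA n (x, y, vx, vy) =
      ( x + (if vx ≤ 0 then (n : Int) * vx
             else if (n : Int) ≤ vx then (n : Int) * vx - pvTri n
             else vx * (vx + 1) / 2),
        y + (n : Int) * vy - pvTri n,
        (if vx ≤ 0 then vx else max (vx - n) 0),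
        vy - n ) := by
  induction n generalizing x y vx vy with
  | zero =>
      by_cases h : vx ≤ 0
      · simp [pvLoopA, pvTri, h]
      · have h0 : ((0 : Nat) : Int) ≤ vx := by push_cast; omega
        simp [pvLoopA, pvTri, h]
        omega
  | succ n ih =>
      show pvLoopA n (x + vx, y + vy, if vx > 0 then vx - 1 else vx, vy - 1) = _
      by_cases hvx : vx ≤ 0
      · have hng : ¬ vx > 0 := by omega
        rw [if_neg hng, ih]
        simp only [if_pos hvx, pvTri_succ]
        refine Prod.ext ?_ (Prod.ext ?_ (Prod.ext ?_ ?_))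
        · push_cast; ring
        · push_cast; ring
        · rfl
        · push_cast; ring
      · have hpos : vx > 0 := by omega
        rw [if_pos hpos, ih]
        simp only [if_neg hvx, pvTri_succ]
        by_cases h1 : vx - 1 ≤ 0
        · have hv1 : vx = 1 := by omega
          subst hv1
          simp only [if_pos h1]
          refine Prod.ext ?_ (Prod.ext ?_ (Prod.ext ?_ ?_))
          · push_cast
            by_cases hn : (n : Int) + 1 ≤ 1
            · have hn0 : n = 0 := by omega
              subst hn0
              norm_num [pvTri]
            · rw [if_neg hn]
              norm_num
          · push_cast; ring
          · push_cast; omega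
          · push_cast; ring
        · simp only [if_neg h1]
          refine Prod.ext ?_ (Prod.ext ?_ (Prod.ext ?_ ?_))
          · push_cast
            by_cases hn : (n : Int) ≤ vx - 1
            · rw [if_pos hn, if_pos (by omega : (n : Int) + 1 ≤ vx)]
              ring
            · rw [if_neg hn, if_neg (by omega : ¬ ((n : Int) + 1 ≤ vx))]
              have hsplit : vx * (vx + 1) = (vx - 1) * (vx - 1 + 1) + vx * 2 := by ring
              rw [hsplit, Int.add_mul_ediv_right _ _ (by norm_num : (2 : Int) ≠ 0)]
              ring
          · push_cast; ring
          · push_cast; omega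
          · push_cast; ring

-- ===== VERDICT (by name: the statement is the Claim_ definition above) =====
theorem brute_force_landing_position_spec : Claim_equal_brute_force_landing_position := by
  intro vx0 vy0 _
  simp only [Spec_brute_force_landing_position, brute_force_landing_position,
    brute_force_landing_position_alt]
  by_cases ht : 2 * vy0 + 2 ≤ 0
  · have h0 : (vy0 * 2 + 2).toNat = 0 := by omega
    simp [h0, pvLoopA, if_pos ht]
  · have hn : ((vy0 * 2 + 2).toNat : Int) = vy0 * 2 + 2 := Int.toNat_of_nonneg (by omega)
    have hfd : ∀ a : Int, PySem.Int.floordiv a 2 = a / 2 :=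
      fun a => PySem.Int.floordiv_eq_ediv_of_pos (by norm_num)
    have htri : pvTri (vy0 * 2 + 2).toNat = (vy0 + 1) * (2 * vy0 + 1) := by
      unfold pvTri
      rw [hn]
      have h2 : (vy0 * 2 + 2) * (vy0 * 2 + 2 - 1) = 2 * ((vy0 + 1) * (2 * vy0 + 1)) := by ring
      rw [h2, pvTwoMul_ediv]
    rw [pvLoopA_char, if_neg ht]
    refine Prod.ext ?_ ?_
    · -- x component
      simp only [hfd, hn, htri]
      by_cases hvx : vx0 ≤ 0
      · rw [if_pos hvx, if_pos hvx]
        ring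
      · rw [if_neg hvx, if_neg hvx]
        by_cases hle : vy0 * 2 + 2 ≤ vx0
        · rw [if_pos hle, if_pos (by omega : 2 * vy0 + 2 ≤ vx0)]
          have h2 : (2 * vy0 + 2) * (2 * vy0 + 2 - 1) = 2 * ((vy0 + 1) * (2 * vy0 + 1)) := by ring
          rw [h2, pvTwoMul_ediv]
          ring
        · rw [if_neg hle, if_neg (by omega : ¬ (2 * vy0 + 2 ≤ vx0))]
          ring
    · -- y component
      simp only [hn, htri]
      ring
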